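-- pv_equiv track=rewrite | github.com/soleribone/UTN_Projects | TP2/main.py | validar_cod_identificacion
-- ===== SOURCE A (Python) =====
-- def validar_cod_identificacion(destinatario):
--     estado = False
--     for c in destinatario:
--         if "A" <= c <= "Z" or c in "0123456789" or c == " ":
--             estado = True
--         elif c in "-_" or c == " ":
--             estado = True
--         else:
--             estado = False
--             break
--
--     return estado
-- ===== SOURCE B (Python) =====
-- import re
--
-- def validar_cod_identificacion(destinatario):
--     return bool(re.fullmatch(r"[A-Z0-9 _-]+", destinatario))
-- ===== Notes on version B (the rewrite author's own statement) =====
-- stated objective: idiomatic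
-- what changed: Replaced the manual flag-and-break character loop with a single regex fullmatch against a character class of uppercase letters, digits, space, underscore and hyphen, repeated at least once so the empty string is still rejected.
import Mathlib
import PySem

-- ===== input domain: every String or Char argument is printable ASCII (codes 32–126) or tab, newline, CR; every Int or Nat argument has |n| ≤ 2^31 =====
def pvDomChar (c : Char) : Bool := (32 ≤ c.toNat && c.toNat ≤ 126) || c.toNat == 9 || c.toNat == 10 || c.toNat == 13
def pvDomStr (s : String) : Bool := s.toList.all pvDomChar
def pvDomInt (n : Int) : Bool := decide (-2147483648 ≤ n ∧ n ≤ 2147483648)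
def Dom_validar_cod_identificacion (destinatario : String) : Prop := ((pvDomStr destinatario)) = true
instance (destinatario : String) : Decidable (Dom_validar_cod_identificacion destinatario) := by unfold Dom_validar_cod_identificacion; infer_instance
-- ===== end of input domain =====

-- B replaces A's flag-and-break loop with a regex fullmatch on the class [A-Z0-9 _-]+ (idiomatic).


-- ===== PORT A =====
def loopA_validar : List Char → Bool → Bool
  | [], estado => estado
  | c :: rest, _ =>
    if ('A' ≤ c ∧ c ≤ 'Z') ∨ c ∈ "0123456789".toList ∨ c = ' ' then
      loopA_validar rest true
    else if c ∈ "-_".toList ∨ c = ' ' then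
      loopA_validar rest true
    else
      false

def validar_cod_identificacion (destinatario : String) : Bool :=
  loopA_validar destinatario.toList false

-- ===== PORT B =====
-- regex character class [A-Z0-9 _-], ported exactly per regex semantics
def reClass_validar (c : Char) : Bool :=
  ('A' ≤ c && c ≤ 'Z') || ('0' ≤ c && c ≤ '9') || c == ' ' || c == '_' || c == '-'

-- re.fullmatch(r"[A-Z0-9 _-]+", s): every char matches the class and at least one char
def validar_cod_identificacion_alt (destinatario : String) : Bool :=
  !destinatario.toList.isEmpty && destinatario.toList.all reClass_validar

-- ===== PRECONDITION & SPEC =====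
def Spec_validar_cod_identificacion (destinatario : String) (out : Bool) : Prop := out = validar_cod_identificacion_alt destinatario
instance (destinatario : String) (out : Bool) : Decidable (Spec_validar_cod_identificacion destinatario out) := by unfold Spec_validar_cod_identificacion; infer_instance

-- ===== CLAIM (what is proved, stated in full; the proofs are below) =====
def Claim_equal_validar_cod_identificacion : Prop := ∀ (destinatario : String), Dom_validar_cod_identificacion destinatario → Spec_validar_cod_identificacion destinatario (validar_cod_identificacion destinatario)

-- ===== LEMMAS AND PROOFS =====

lemma condA_iff (c : Char) :
    (('A' ≤ c ∧ c ≤ 'Z') ∨ c ∈ "0123456789".toList ∨ c = ' ') ∨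
      (c ∈ "-_".toList ∨ c = ' ') ↔ reClass_validar c = true := by
  have hd : "0123456789".toList = ['0','1','2','3','4','5','6','7','8','9'] := rfl
  have hu : "-_".toList = ['-','_'] := rfl
  simp [reClass_validar, hd, hu, Char.le_def, Char.ext_iff, UInt32.le_iff_toNat_le,
    UInt32.toNat_inj.symm]
  omega

lemma loopA_step (c : Char) (rest : List Char) (e : Bool) (hc : reClass_validar c = true) :
    loopA_validar (c :: rest) e = loopA_validar rest true := by
  have h1 := (condA_iff c).mpr hc
  unfold loopA_validar
  split_ifs with g1 g2
  · exact loopA_validar.eq_def rest true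
  · exact loopA_validar.eq_def rest true
  · exact absurd h1 (by tauto)

lemma loopA_stop (c : Char) (rest : List Char) (e : Bool) (hc : reClass_validar c = false) :
    loopA_validar (c :: rest) e = false := by
  have h1 : ¬ ((('A' ≤ c ∧ c ≤ 'Z') ∨ c ∈ "0123456789".toList ∨ c = ' ') ∨
      (c ∈ "-_".toList ∨ c = ' ')) := by
    intro h
    rw [(condA_iff c).mp h] at hc
    simp at hc
  unfold loopA_validar
  split_ifs with g1 g2
  · exact absurd (Or.inl g1) h1
  · exact absurd (Or.inr g2) h1
  · rfl

lemma loopA_eq (l : List Char) (e : Bool) (h : l ≠ []) :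
    loopA_validar l e = l.all reClass_validar := by
  induction l generalizing e with
  | nil => simp at h
  | cons c rest ih =>
    by_cases hc : reClass_validar c = true
    · rw [loopA_step c rest e hc]
      cases rest with
      | nil => simp [loopA_validar, hc]
      | cons d rs => rw [ih true (by simp)]; simp [hc]
    · have hc' : reClass_validar c = false := by simpa using hc
      rw [loopA_stop c rest e hc']
      simp [hc']

-- ===== VERDICT (by name: the statement is the Claim_ definition above) =====
theorem validar_cod_identificacion_spec : Claim_equal_validar_cod_identificacion := by
  intro s _
  unfold Spec_validar_cod_identificacion validar_cod_identificacion validar_cod_identificacion_alt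
  cases hl : s.toList with
  | nil => simp [loopA_validar]
  | cons c rest => rw [loopA_eq _ _ (by simp)]; simp
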